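-- pv_equiv track=rewrite | github.com/EduardR02/GTA-V-Self-Driving | merge_head_checkpoint.py | _build_canonical_key_map
-- ===== SOURCE A (Python) =====
-- UNWANTED_PREFIX = "_orig_mod."
--
-- def _strip_compile_prefix(key: str) -> str:
--     while key.startswith(UNWANTED_PREFIX):
--         key = key[len(UNWANTED_PREFIX):]
--     return key
--
-- def _build_canonical_key_map(state_dict: dict, label: str) -> dict[str, str]:
--     canonical_to_raw: dict[str, str] = {}
--     collisions: dict[str, list[str]] = {}
--
--     for raw_key in state_dict.keys():
--         canonical_key = _strip_compile_prefix(raw_key)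
--         existing = canonical_to_raw.get(canonical_key)
--         if existing is None:
--             canonical_to_raw[canonical_key] = raw_key
--             continue
--         if existing != raw_key:
--             collisions.setdefault(canonical_key, [existing]).append(raw_key)
--
--     if collisions:
--         lines = [f"{canonical}: {raw_keys}" for canonical, raw_keys in sorted(collisions.items())]
--         details = "\n  ".join(lines)
--         raise RuntimeError(
--             f"{label} checkpoint has duplicate canonical keys after stripping '{UNWANTED_PREFIX}':\n  {details}"
--         )
--
--     return canonical_to_raw
-- ===== SOURCE B (Python) =====
-- UNWANTED_PREFIX = "_orig_mod."
--
-- def _strip_compile_prefix(key: str) -> str: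
--     while key.startswith(UNWANTED_PREFIX):
--         key = key[len(UNWANTED_PREFIX):]
--     return key
--
-- def _dup_groups(pairs):
--     # pairs is sorted by canonical key; return the (canonical, raw_keys) groups
--     # of size > 1, in (sorted) order, by splitting the list into maximal runs.
--     groups = []
--     n = len(pairs)
--     i = 0
--     while i < n:
--         j = i + 1
--         while j < n and pairs[j][0] == pairs[i][0]:
--             j += 1
--         if j - i > 1:
--             groups.append((pairs[i][0], [p[1] for p in pairs[i:j]]))
--         i = j
--     return groups
--
-- def _build_canonical_key_map(state_dict: dict, label: str) -> dict[str, str]: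
--     # Stage 1: materialise all (canonical, raw) pairs.  Stage 2: sort them by
--     # canonical (stable, so raw keys keep encounter order) and find duplicate
--     # runs by adjacent comparison.  Stage 3: no duplicates -> dict(pairs).
--     pairs = [(_strip_compile_prefix(k), k) for k in state_dict.keys()]
--     collisions = _dup_groups(sorted(pairs, key=lambda p: p[0]))
--     if collisions:
--         lines = [f"{canonical}: {raw_keys}" for canonical, raw_keys in collisions]
--         details = "\n  ".join(lines)
--         raise RuntimeError(
--             f"{label} checkpoint has duplicate canonical keys after stripping '{UNWANTED_PREFIX}':\n  {details}"
--         )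
--     return dict(pairs)
-- ===== Notes on version B (the rewrite author's own statement) =====
-- stated objective: alternative
-- what changed: A detects collisions with interleaved hash-dict bookkeeping inside a single pass; B materialises all (canonical, raw) pairs, sorts them by canonical key and finds collision groups by adjacent-run comparison in a recursive scan, then returns dict(pairs).
import Mathlib
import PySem

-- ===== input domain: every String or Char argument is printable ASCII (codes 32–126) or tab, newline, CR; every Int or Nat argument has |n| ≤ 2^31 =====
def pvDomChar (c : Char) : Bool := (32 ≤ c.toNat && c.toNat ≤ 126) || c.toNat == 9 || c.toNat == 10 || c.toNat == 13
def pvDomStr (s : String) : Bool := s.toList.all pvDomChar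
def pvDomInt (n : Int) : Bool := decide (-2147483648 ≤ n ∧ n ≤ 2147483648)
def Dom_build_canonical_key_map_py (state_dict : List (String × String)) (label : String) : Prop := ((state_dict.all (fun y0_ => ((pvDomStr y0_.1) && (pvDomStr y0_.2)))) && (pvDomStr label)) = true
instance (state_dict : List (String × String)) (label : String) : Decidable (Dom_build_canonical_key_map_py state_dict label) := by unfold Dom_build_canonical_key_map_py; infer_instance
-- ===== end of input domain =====

-- B replaces A's in-loop hash-dict collision bookkeeping by sort-then-adjacent-run scanning of the
-- (canonical, raw) pairs; equivalence of RETURN values is claimed on Pre_ (the non-raising inputs).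

-- shared module helper _strip_compile_prefix (used by both Python versions)
def pvPrefix : List Char := ['_', 'o', 'r', 'i', 'g', '_', 'm', 'o', 'd', '.']

-- while key.startswith("_orig_mod."): key = key[len("_orig_mod."):]
-- fuel = |s| is a totality guard only: each iteration strips 10 characters, so it never runs out.
def stripGo : Nat → List Char → List Char
  | 0, s => s
  | fuel + 1, s =>
    if PySem.Chars.startswith s pvPrefix then
      stripGo fuel (PySem.List.slice s (some (10 : Int)) none)
    else s

def stripChars (s : List Char) : List Char := stripGo s.length s

def pyStrip (s : String) : String := String.ofList (stripChars s.toList)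

-- ===== PORT A =====
def build_canonical_key_map_py (state_dict : List (String × String)) (label : String) : List (String × String) :=
  let d := PySem.Dict.ofList state_dict
  let res := d.keys.foldl
    (fun (st : PySem.Dict String String × PySem.Dict String (List String)) raw =>
      let c := pyStrip raw
      match st.1.get? c with
      | none => (st.1.insert c raw, st.2)
      | some existing =>
        if existing ≠ raw then (st.1, st.2.modify c [existing] (fun l => l ++ [raw])) else st)
    (PySem.Dict.empty, PySem.Dict.empty)
  -- 'if collisions: raise RuntimeError(...)' — raising inputs are outside Pre_; the port returns [] there
  if res.2.items ≠ [] then [] else res.1.items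

-- ===== PORT B =====
-- _dup_groups: the outer while loop splits the sorted list into maximal runs of equal canonical
-- key; one outer iteration = one step of this recursion on the remaining suffix.
def dupGroups (pairs : List (String × String)) : List (String × List String) :=
  match pairs with
  | [] => []
  | (c, r) :: t =>
    -- 'j = i + 1; while j < n and pairs[j][0] == pairs[i][0]: j += 1' — j - i = 1 + run.length
    let run := t.takeWhile (fun p => p.1 == c)
    let rest := dupGroups (t.drop run.length)
    if run.length > 0 then (c, r :: run.map (fun p => p.2)) :: rest else rest
termination_by pairs.length
decreasing_by
  simp only [List.length_cons, List.length_drop]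
  omega

def build_canonical_key_map_py_alt (state_dict : List (String × String)) (label : String) : List (String × String) :=
  let pairs := (PySem.Dict.ofList state_dict).keys.map (fun k => (pyStrip k, k))
  let collisions := dupGroups (PySem.List.sorted pairs (fun p => p.1) false)
  -- 'if collisions: raise RuntimeError(...)' — raising inputs are outside Pre_; the port returns [] there
  if collisions ≠ [] then []
  else (PySem.Dict.ofList pairs).items

-- ===== PRECONDITION & SPEC =====
-- Pre_ excludes exactly the inputs on which A (and B) raise RuntimeError: two distinct raw keys
-- of the dict stripping to the same canonical key.
def Pre_build_canonical_key_map_py (state_dict : List (String × String)) (label : String) : Prop :=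
  ((PySem.Dict.ofList state_dict).keys.map pyStrip).Nodup
instance (state_dict : List (String × String)) (label : String) : Decidable (Pre_build_canonical_key_map_py state_dict label) := by unfold Pre_build_canonical_key_map_py; infer_instance

def pvWitness_build_canonical_key_map_py : (List (String × String)) × String :=
  ([("_orig_mod.layer.weight", "w"), ("layer.bias", "b")], "model")

def Spec_build_canonical_key_map_py (state_dict : List (String × String)) (label : String) (out : List (String × String)) : Prop := out = build_canonical_key_map_py_alt state_dict label
instance (state_dict : List (String × String)) (label : String) (out : List (String × String)) : Decidable (Spec_build_canonical_key_map_py state_dict label out) := by unfold Spec_build_canonical_key_map_py; infer_instance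

-- ===== CLAIM (what is proved, stated in full; the proofs are below) =====
def Claim_equal_build_canonical_key_map_py : Prop := ∀ (state_dict : List (String × String)) (label : String), Dom_build_canonical_key_map_py state_dict label → Pre_build_canonical_key_map_py state_dict label → Spec_build_canonical_key_map_py state_dict label (build_canonical_key_map_py state_dict label)

-- ===== LEMMAS AND PROOFS =====

-- A's loop under freshness: the collision dict never changes and the first-seen dict appends fresh pairs.
theorem A_loop (ks : List String) (d : PySem.Dict String String) (coll : PySem.Dict String (List String))
    (hnd : (ks.map pyStrip).Nodup) (hfresh : ∀ k ∈ ks, d.contains (pyStrip k) = false) :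
    ks.foldl
      (fun (st : PySem.Dict String String × PySem.Dict String (List String)) raw =>
        let c := pyStrip raw
        match st.1.get? c with
        | none => (st.1.insert c raw, st.2)
        | some existing =>
          if existing ≠ raw then (st.1, st.2.modify c [existing] (fun l => l ++ [raw])) else st)
      (d, coll)
    = (ks.foldl (fun d k => d.insert (pyStrip k) k) d, coll) := by
  induction ks generalizing d with
  | nil => simp
  | cons k t ih =>
    simp only [List.map_cons, List.nodup_cons, List.mem_map] at hnd
    have hk : d.get? (pyStrip k) = none := by
      rw [PySem.Dict.get?_eq_none_iff_contains]
      exact hfresh k (List.mem_cons_self ..)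
    simp only [List.foldl_cons, hk]
    exact ih (d.insert (pyStrip k) k) hnd.2 (by
      intro k' hk'
      rw [PySem.Dict.contains_insert]
      have hne : ¬ pyStrip k' == pyStrip k := by
        simp only [beq_iff_eq]
        intro he
        exact hnd.1 ⟨k', hk', he⟩
      simp [hne, hfresh k' (List.mem_cons_of_mem _ hk')])

-- B's scan finds no duplicate run when the canonical keys are distinct.
theorem dupGroups_eq_nil (pairs : List (String × String))
    (hnd : (pairs.map Prod.fst).Nodup) : dupGroups pairs = [] := by
  induction pairs with
  | nil => rw [dupGroups]
  | cons hd t ih =>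
    obtain ⟨c, r⟩ := hd
    simp only [List.map_cons, List.nodup_cons, List.mem_map] at hnd
    have hrun : t.takeWhile (fun p : String × String => p.1 == c) = [] := by
      cases t with
      | nil => rfl
      | cons p t' =>
        have hne : (p.1 == c) = false := by
          simp only [beq_eq_false_iff_ne, ne_eq]
          intro he
          exact hnd.1 ⟨p, List.mem_cons_self .., he⟩
        simp [hne]
    rw [dupGroups]
    simp only [hrun, List.length_nil, List.drop_zero, gt_iff_lt, lt_self_iff_false, if_false]
    exact ih hnd.2

-- ===== VERDICT (by name: the statement is the Claim_ definition above) =====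
theorem build_canonical_key_map_py_spec : Claim_equal_build_canonical_key_map_py := by
  intro state_dict label _dom hpre
  unfold Pre_build_canonical_key_map_py at hpre
  show build_canonical_key_map_py state_dict label = build_canonical_key_map_py_alt state_dict label
  have hAitems : ((PySem.Dict.ofList state_dict).keys.foldl
        (fun d k => d.insert (pyStrip k) k) PySem.Dict.empty).items
      = (PySem.Dict.ofList state_dict).keys.map (fun k => (pyStrip k, k)) := by
    simpa using PySem.Dict.items_foldl_insert_fresh (PySem.Dict.ofList state_dict).keys
      pyStrip (fun k => k) PySem.Dict.empty (by simp) hpre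
  have h1 : build_canonical_key_map_py state_dict label
      = (PySem.Dict.ofList state_dict).keys.map (fun k => (pyStrip k, k)) := by
    unfold build_canonical_key_map_py
    dsimp only
    rw [A_loop _ _ _ hpre (by simp)]
    simpa using hAitems
  have hpairs : (((PySem.Dict.ofList state_dict).keys.map (fun k => (pyStrip k, k))).map Prod.fst).Nodup := by
    simpa [List.map_map, Function.comp_def] using hpre
  have hsortnd : ((PySem.List.sorted ((PySem.Dict.ofList state_dict).keys.map (fun k => (pyStrip k, k)))
      (fun p => p.1) false).map Prod.fst).Nodup :=
    ((PySem.List.sorted_perm _ _ _).map Prod.fst).nodup_iff.mpr hpairs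
  have h2 : build_canonical_key_map_py_alt state_dict label
      = (PySem.Dict.ofList state_dict).keys.map (fun k => (pyStrip k, k)) := by
    unfold build_canonical_key_map_py_alt
    dsimp only
    rw [dupGroups_eq_nil _ hsortnd]
    simp only [ne_eq, not_true_eq_false, if_false]
    simpa using PySem.Dict.items_foldl_insert_fresh
      ((PySem.Dict.ofList state_dict).keys.map (fun k => (pyStrip k, k)))
      Prod.fst Prod.snd PySem.Dict.empty (by simp) (by simpa using hpairs)
  rw [h1, h2]
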